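-- pv_equiv track=rewrite | github.com/ram-elgov/cs1001py | hw/hw2/src/hw2_206867517.py | print_rectangle
-- ===== SOURCE A (Python) =====
-- def print_rectangle(length, width):
--     result = ""
--     for row in range(length):
--         for column in range(width):
--             if row == 0 or row == length - 1 or column == 0 or column == width - 1:
--                 result = result + "*"
--             else:
--                 result = result + " "
--         if row != length - 1:
--             result = result + "\n"
--     return result
-- ===== SOURCE B (Python) =====
-- def print_rectangle(length, width):
--     rows = []
--     for row in range(length):
--         if row == 0 or row == length - 1 or width <= 1:
--             rows.append("*" * width)
--         else:
--             rows.append("*" + " " * (width - 2) + "*")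
--     return "\n".join(rows)
-- ===== Notes on version B (the rewrite author's own statement) =====
-- stated objective: faster
-- what changed: B builds the rectangle row-by-row ('*'*width or '*'+' '*(width-2)+'*') and joins the row list with '\n'.join, instead of A's nested per-character loop that grows the result one character at a time with repeated string concatenation.
import Mathlib
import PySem

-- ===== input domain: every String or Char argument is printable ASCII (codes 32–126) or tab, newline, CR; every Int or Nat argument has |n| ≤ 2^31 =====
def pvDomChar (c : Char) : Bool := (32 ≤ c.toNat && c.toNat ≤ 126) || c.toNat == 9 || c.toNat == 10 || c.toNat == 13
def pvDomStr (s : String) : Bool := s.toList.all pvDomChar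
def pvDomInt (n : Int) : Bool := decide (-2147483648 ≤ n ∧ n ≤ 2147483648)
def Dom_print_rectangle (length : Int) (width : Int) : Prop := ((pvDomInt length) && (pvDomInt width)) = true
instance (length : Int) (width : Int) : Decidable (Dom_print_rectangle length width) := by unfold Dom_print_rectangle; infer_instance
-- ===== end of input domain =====

-- B builds each row whole (string multiplication) and joins the rows with '\n'.join,
-- instead of A's nested per-character loop that appends one character at a time;
-- objective: faster (a timing run measured it).

-- ===== PORT A =====
-- A, step for step: outer loop over rows, inner loop over columns appending one char,
-- conditional newline after each non-last row.  Strings are built on List Char and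
-- wrapped with String.mk at the end (PySem's string representation).
def print_rectangle (length : Int) (width : Int) : String :=
  String.mk ((PySem.List.pyRange 0 length 1).foldl (fun result row =>
    let result := (PySem.List.pyRange 0 width 1).foldl (fun r column =>
      if row = 0 ∨ row = length - 1 ∨ column = 0 ∨ column = width - 1
      then r ++ ['*'] else r ++ [' ']) result
    if row ≠ length - 1 then result ++ ['\n'] else result) [])

-- ===== PORT B =====
-- B, step for step: one row string per row ('*'*width, or '*'+' '*(width-2)+'*'),
-- joined with '\n'.
def print_rectangle_alt (length : Int) (width : Int) : String :=
  String.mk (PySem.Chars.join ['\n'] ((PySem.List.pyRange 0 length 1).map (fun row =>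
    if row = 0 ∨ row = length - 1 ∨ width ≤ 1
    then PySem.List.pyRepeat ['*'] width
    else ['*'] ++ PySem.List.pyRepeat [' '] (width - 2) ++ ['*'])))

-- ===== PRECONDITION & SPEC =====
def Spec_print_rectangle (length : Int) (width : Int) (out : String) : Prop := out = print_rectangle_alt length width
instance (length : Int) (width : Int) (out : String) : Decidable (Spec_print_rectangle length width out) := by unfold Spec_print_rectangle; infer_instance

-- ===== CLAIM (what is proved, stated in full; the proofs are below) =====
def Claim_equal_print_rectangle : Prop := ∀ (length : Int) (width : Int), Dom_print_rectangle length width → Spec_print_rectangle length width (print_rectangle length width)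

-- ===== LEMMAS AND PROOFS =====

-- B's row expression, as a function of the row index.
def pvRowB (length width row : Int) : List Char :=
  if row = 0 ∨ row = length - 1 ∨ width ≤ 1
  then PySem.List.pyRepeat ['*'] width
  else ['*'] ++ PySem.List.pyRepeat [' '] (width - 2) ++ ['*']

-- A's inner character loop produces exactly B's row.
lemma pvInner_eq_rowB (length width row : Int) (acc : List Char) :
    (PySem.List.pyRange 0 width 1).foldl (fun r column =>
      if row = 0 ∨ row = length - 1 ∨ column = 0 ∨ column = width - 1
      then r ++ ['*'] else r ++ [' ']) acc = acc ++ pvRowB length width row := by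
  have hstep : (fun (r : List Char) (column : Int) =>
      if row = 0 ∨ row = length - 1 ∨ column = 0 ∨ column = width - 1
      then r ++ ['*'] else r ++ [' '])
      = (fun r column => r ++ [if row = 0 ∨ row = length - 1 ∨ column = 0 ∨ column = width - 1 then '*' else ' ']) := by
    funext r c; split <;> rfl
  rw [hstep, PySem.List.foldl_append_singleton_eq_map]
  congr 1
  unfold pvRowB
  by_cases hfl : row = 0 ∨ row = length - 1
  · -- first or last row: every char is '*'
    have hmap : (PySem.List.pyRange 0 width 1).map
        (fun c => if row = 0 ∨ row = length - 1 ∨ c = 0 ∨ c = width - 1 then '*' else ' ')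
        = (PySem.List.pyRange 0 width 1).map (fun _ => '*') := by
      apply List.map_congr_left; intro c _
      simp [hfl.elim (fun h => Or.inl h) (fun h => Or.inr (Or.inl h))]
    by_cases hw1 : width ≤ 1 <;>
      simp [hmap, List.map_const', PySem.List.length_pyRange_one,
        PySem.List.pyRepeat_singleton, hfl, hw1]
  · push_neg at hfl
    obtain ⟨h0, hl⟩ := hfl
    by_cases hw1 : width ≤ 1
    · -- interior row, width ≤ 1
      rcases lt_or_eq_of_le hw1 with hw | hw
      · -- width ≤ 0 : empty row
        have hnil : PySem.List.pyRange 0 width 1 = [] :=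
          PySem.List.pyRange_one_eq_nil (by omega)
        have hT : width.toNat = 0 := by omega
        simp [hnil, h0, hl, hw1, PySem.List.pyRepeat_singleton, hT]
      · -- width = 1 : single '*'
        subst hw
        rw [show PySem.List.pyRange 0 1 1 = [0] from PySem.List.pyRange_one_singleton 0]
        simp [h0, hl, PySem.List.pyRepeat_singleton]
    · -- interior row, width ≥ 2 : bordered row
      rw [show PySem.List.pyRange 0 width 1
            = PySem.List.pyRange 0 1 1 ++ PySem.List.pyRange 1 width 1 from
          PySem.List.pyRange_one_append 0 1 width (by omega) (by omega),
        show PySem.List.pyRange 1 width 1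
            = PySem.List.pyRange 1 (width - 1) 1 ++ PySem.List.pyRange (width - 1) width 1 from
          PySem.List.pyRange_one_append 1 (width - 1) width (by omega) (by omega),
        show PySem.List.pyRange 0 1 1 = [0] from PySem.List.pyRange_one_singleton 0]
      have hmid : (PySem.List.pyRange 1 (width - 1) 1).map
          (fun c => if row = 0 ∨ row = length - 1 ∨ c = 0 ∨ c = width - 1 then '*' else ' ')
          = (PySem.List.pyRange 1 (width - 1) 1).map (fun _ => ' ') := by
        apply List.map_congr_left; intro c hc
        rw [PySem.List.mem_pyRange_one] at hc
        simp [h0, hl]; omega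
      have hlast : PySem.List.pyRange (width - 1) width 1 = [width - 1] := by
        have := PySem.List.pyRange_one_singleton (width - 1)
        simpa [show width - 1 + 1 = width by ring] using this
      simp only [hlast, List.map_append, hmid, List.map_const',
        PySem.List.length_pyRange_one, List.map_cons, List.map_nil]
      simp [h0, hl, hw1, PySem.List.pyRepeat_singleton,
        show width - 1 - 1 = width - 2 by ring]

lemma pvOuter (length width : Int) (a : Int) (acc : List Char) (ha : 0 ≤ a) :
    (PySem.List.pyRange a length 1).foldl (fun result row =>
      let result := (PySem.List.pyRange 0 width 1).foldl (fun r column =>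
        if row = 0 ∨ row = length - 1 ∨ column = 0 ∨ column = width - 1
        then r ++ ['*'] else r ++ [' ']) result
      if row ≠ length - 1 then result ++ ['\n'] else result) acc
    = acc ++ PySem.Chars.join ['\n'] ((PySem.List.pyRange a length 1).map (pvRowB length width)) := by
  by_cases hab : length ≤ a
  · rw [PySem.List.pyRange_one_eq_nil hab]
    simp [PySem.Chars.join_nil]
  · push_neg at hab
    obtain ⟨n, hn⟩ : ∃ n, (length - a).toNat = n + 1 := ⟨(length - a).toNat - 1, by omega⟩
    clear hab
    induction n generalizing a acc with
    | zero =>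
      have ha' : a = length - 1 := by omega
      rw [show PySem.List.pyRange a length 1 = a :: PySem.List.pyRange (a + 1) length 1 from
          PySem.List.pyRange_one_cons (by omega),
        PySem.List.pyRange_one_eq_nil (show length ≤ a + 1 by omega)]
      simp only [List.foldl_cons, List.foldl_nil, List.map_cons, List.map_nil]
      rw [pvInner_eq_rowB]
      simp [ha', PySem.Chars.join_singleton]
    | succ m ih =>
      rw [show PySem.List.pyRange a length 1 = a :: PySem.List.pyRange (a + 1) length 1 from
          PySem.List.pyRange_one_cons (by omega)]
      simp only [List.foldl_cons, List.map_cons]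
      rw [pvInner_eq_rowB]
      have hne : a ≠ length - 1 := by omega
      have h1 : (0 : Int) ≤ a + 1 := by omega
      have h2 : (length - (a + 1)).toNat = m + 1 := by omega
      rw [if_pos hne, ih (a + 1) _ h1 h2]
      have htl := PySem.List.pyRange_one_cons (show a + 1 < length by omega)
      rw [show a + 1 + 1 = a + 2 by ring] at htl
      rw [htl]
      simp [PySem.Chars.join_cons_cons]

-- ===== VERDICT (by name: the statement is the Claim_ definition above) =====
theorem print_rectangle_spec : Claim_equal_print_rectangle := by
  intro length width _
  unfold Spec_print_rectangle print_rectangle print_rectangle_alt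
  rw [pvOuter length width 0 [] le_rfl]
  rfl
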